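-- pv_equiv track=rewrite | github.com/R0yJing/Side-Projects | aes.py | inv_bytesub
-- ===== SOURCE A (Python) =====
-- inv_sbox = [0x52, 0x09, 0x6A, 0xD5, 0x30, 0x36, 0xA5, 0x38, 0xBF, 0x40, 0xA3, 0x9E, 0x81, 0xF3, 0xD7, 0xFB,
--             0x7C, 0xE3, 0x39, 0x82, 0x9B, 0x2F, 0xFF, 0x87, 0x34, 0x8E, 0x43, 0x44, 0xC4, 0xDE, 0xE9, 0xCB,
--             0x54, 0x7B, 0x94, 0x32, 0xA6, 0xC2, 0x23, 0x3D, 0xEE, 0x4C, 0x95, 0x0B, 0x42, 0xFA, 0xC3, 0x4E,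
--             0x08, 0x2E, 0xA1, 0x66, 0x28, 0xD9, 0x24, 0xB2, 0x76, 0x5B, 0xA2, 0x49, 0x6D, 0x8B, 0xD1, 0x25,
--             0x72, 0xF8, 0xF6, 0x64, 0x86, 0x68, 0x98, 0x16, 0xD4, 0xA4, 0x5C, 0xCC, 0x5D, 0x65, 0xB6, 0x92,
--             0x6C, 0x70, 0x48, 0x50, 0xFD, 0xED, 0xB9, 0xDA, 0x5E, 0x15, 0x46, 0x57, 0xA7, 0x8D, 0x9D, 0x84,
--             0x90, 0xD8, 0xAB, 0x00, 0x8C, 0xBC, 0xD3, 0x0A, 0xF7, 0xE4, 0x58, 0x05, 0xB8, 0xB3, 0x45, 0x06,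
--             0xD0, 0x2C, 0x1E, 0x8F, 0xCA, 0x3F, 0x0F, 0x02, 0xC1, 0xAF, 0xBD, 0x03, 0x01, 0x13, 0x8A, 0x6B,
--             0x3A, 0x91, 0x11, 0x41, 0x4F, 0x67, 0xDC, 0xEA, 0x97, 0xF2, 0xCF, 0xCE, 0xF0, 0xB4, 0xE6, 0x73,
--             0x96, 0xAC, 0x74, 0x22, 0xE7, 0xAD, 0x35, 0x85, 0xE2, 0xF9, 0x37, 0xE8, 0x1C, 0x75, 0xDF, 0x6E,
--             0x47, 0xF1, 0x1A, 0x71, 0x1D, 0x29, 0xC5, 0x89, 0x6F, 0xB7, 0x62, 0x0E, 0xAA, 0x18, 0xBE, 0x1B,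
--             0xFC, 0x56, 0x3E, 0x4B, 0xC6, 0xD2, 0x79, 0x20, 0x9A, 0xDB, 0xC0, 0xFE, 0x78, 0xCD, 0x5A, 0xF4,
--             0x1F, 0xDD, 0xA8, 0x33, 0x88, 0x07, 0xC7, 0x31, 0xB1, 0x12, 0x10, 0x59, 0x27, 0x80, 0xEC, 0x5F,
--             0x60, 0x51, 0x7F, 0xA9, 0x19, 0xB5, 0x4A, 0x0D, 0x2D, 0xE5, 0x7A, 0x9F, 0x93, 0xC9, 0x9C, 0xEF,
--             0xA0, 0xE0, 0x3B, 0x4D, 0xAE, 0x2A, 0xF5, 0xB0, 0xC8, 0xEB, 0xBB, 0x3C, 0x83, 0x53, 0x99, 0x61,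
--             0x17, 0x2B, 0x04, 0x7E, 0xBA, 0x77, 0xD6, 0x26, 0xE1, 0x69, 0x14, 0x63, 0x55, 0x21, 0x0C, 0x7D]
--
-- BWIDTH = 8
--
-- def inv_bytesub(x):
--     acc =0
--     #assume bit length of 128
--     shift = 1
--     for i in range(0, 16):
--         v = x & 0xff
--         x >>= BWIDTH
--         acc += inv_sbox [(v >> 4) * 16 + (v & 0xf)] * shift
--         shift <<= BWIDTH
--     return acc
-- ===== SOURCE B (Python) =====
-- def _gf_mul(a, b):
--     # carry-less multiply modulo the AES polynomial x^8+x^4+x^3+x+1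
--     p = 0
--     while b:
--         if b & 1:
--             p ^= a
--         a <<= 1
--         if a & 0x100:
--             a ^= 0x11B
--         b >>= 1
--     return p
--
-- def _inv_sub(b):
--     # inverse affine transform: x = rotl(y,1) ^ rotl(y,3) ^ rotl(y,6) ^ 0x05
--     y = 0x05
--     for n in (1, 3, 6):
--         y ^= ((b << n) | (b >> (8 - n))) & 0xFF
--     # multiplicative inverse in GF(2^8) as y^254 (sends 0 to 0), square-and-multiply
--     r, t = 1, _gf_mul(y, y)
--     for _ in range(7):
--         r = _gf_mul(r, t)
--         t = _gf_mul(t, t)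
--     return r
--
-- def inv_bytesub(x):
--     # Horner assembly from the most significant of the 16 state bytes down
--     acc = 0
--     for i in range(15, -1, -1):
--         acc = (acc << 8) + _inv_sub((x >> (8 * i)) & 0xFF)
--     return acc
-- ===== Notes on version B (the rewrite author's own statement) =====
-- stated objective: alternative
-- what changed: B discards the inverse S-box lookup table entirely and computes each substituted byte algebraically (inverse affine transform, then the Rijndael-field multiplicative inverse by square-and-multiply with a carry-less multiplier), assembling the result by a high-to-low Horner pass instead of A's low-to-high shift/mask accumulation.
import Mathlib
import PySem

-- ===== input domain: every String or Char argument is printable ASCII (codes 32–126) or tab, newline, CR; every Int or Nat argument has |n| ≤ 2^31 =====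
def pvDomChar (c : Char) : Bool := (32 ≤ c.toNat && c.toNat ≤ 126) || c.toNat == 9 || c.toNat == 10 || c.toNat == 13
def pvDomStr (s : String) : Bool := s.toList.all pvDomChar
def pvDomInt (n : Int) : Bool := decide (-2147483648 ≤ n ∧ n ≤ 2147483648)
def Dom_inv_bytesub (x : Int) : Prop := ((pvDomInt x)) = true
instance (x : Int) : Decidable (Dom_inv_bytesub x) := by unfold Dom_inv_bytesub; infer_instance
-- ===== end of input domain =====

-- B replaces A's table lookup + low-to-high shift/mask accumulation by an algebraic
-- computation of each inverse S-box byte (inverse affine transform, then GF(2^8)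
-- inverse as y^254 by square-and-multiply) assembled by a high-to-low Horner pass;
-- objective: alternative (same cost class). Return values agree for every Int input.

def invSbox : List Int := [0x52, 0x09, 0x6A, 0xD5, 0x30, 0x36, 0xA5, 0x38, 0xBF, 0x40, 0xA3, 0x9E, 0x81, 0xF3, 0xD7, 0xFB,
            0x7C, 0xE3, 0x39, 0x82, 0x9B, 0x2F, 0xFF, 0x87, 0x34, 0x8E, 0x43, 0x44, 0xC4, 0xDE, 0xE9, 0xCB,
            0x54, 0x7B, 0x94, 0x32, 0xA6, 0xC2, 0x23, 0x3D, 0xEE, 0x4C, 0x95, 0x0B, 0x42, 0xFA, 0xC3, 0x4E,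
            0x08, 0x2E, 0xA1, 0x66, 0x28, 0xD9, 0x24, 0xB2, 0x76, 0x5B, 0xA2, 0x49, 0x6D, 0x8B, 0xD1, 0x25,
            0x72, 0xF8, 0xF6, 0x64, 0x86, 0x68, 0x98, 0x16, 0xD4, 0xA4, 0x5C, 0xCC, 0x5D, 0x65, 0xB6, 0x92,
            0x6C, 0x70, 0x48, 0x50, 0xFD, 0xED, 0xB9, 0xDA, 0x5E, 0x15, 0x46, 0x57, 0xA7, 0x8D, 0x9D, 0x84,
            0x90, 0xD8, 0xAB, 0x00, 0x8C, 0xBC, 0xD3, 0x0A, 0xF7, 0xE4, 0x58, 0x05, 0xB8, 0xB3, 0x45, 0x06,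
            0xD0, 0x2C, 0x1E, 0x8F, 0xCA, 0x3F, 0x0F, 0x02, 0xC1, 0xAF, 0xBD, 0x03, 0x01, 0x13, 0x8A, 0x6B,
            0x3A, 0x91, 0x11, 0x41, 0x4F, 0x67, 0xDC, 0xEA, 0x97, 0xF2, 0xCF, 0xCE, 0xF0, 0xB4, 0xE6, 0x73,
            0x96, 0xAC, 0x74, 0x22, 0xE7, 0xAD, 0x35, 0x85, 0xE2, 0xF9, 0x37, 0xE8, 0x1C, 0x75, 0xDF, 0x6E,
            0x47, 0xF1, 0x1A, 0x71, 0x1D, 0x29, 0xC5, 0x89, 0x6F, 0xB7, 0x62, 0x0E, 0xAA, 0x18, 0xBE, 0x1B,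
            0xFC, 0x56, 0x3E, 0x4B, 0xC6, 0xD2, 0x79, 0x20, 0x9A, 0xDB, 0xC0, 0xFE, 0x78, 0xCD, 0x5A, 0xF4,
            0x1F, 0xDD, 0xA8, 0x33, 0x88, 0x07, 0xC7, 0x31, 0xB1, 0x12, 0x10, 0x59, 0x27, 0x80, 0xEC, 0x5F,
            0x60, 0x51, 0x7F, 0xA9, 0x19, 0xB5, 0x4A, 0x0D, 0x2D, 0xE5, 0x7A, 0x9F, 0x93, 0xC9, 0x9C, 0xEF,
            0xA0, 0xE0, 0x3B, 0x4D, 0xAE, 0x2A, 0xF5, 0xB0, 0xC8, 0xEB, 0xBB, 0x3C, 0x83, 0x53, 0x99, 0x61,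
            0x17, 0x2B, 0x04, 0x7E, 0xBA, 0x77, 0xD6, 0x26, 0xE1, 0x69, 0x14, 0x63, 0x55, 0x21, 0x0C, 0x7D]

-- ===== PORT A =====
-- literal transliteration of A's loop: state (acc, x, shift), mask/shift/lookup per iteration
def inv_bytesub (x : Int) : Int :=
  ((PySem.List.pyRange 0 16 1).foldl
    (fun (s : Int × Int × Int) (_i : Int) =>
      let acc := s.1
      let x := s.2.1
      let shift := s.2.2
      let v := PySem.Int.band x 255
      let x := x >>> (8:Nat)
      (acc + PySem.List.pyGetD invSbox ((v >>> (4:Nat)) * 16 + PySem.Int.band v 15) 0 * shift,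
       x, shift <<< (8:Nat)))
    (0, x, 1)).1

-- ===== PORT B =====
-- _gf_mul: carry-less multiply modulo the AES polynomial, loop on b transcribed as
-- structural recursion on b (the xor-accumulated p becomes the xor of the contributions)
-- (fuel = b is enough since the multiplier halves each step; the fuel only totalizes the loop)
def gfMulGo : Nat → Nat → Nat → Nat
  | 0, _, _ => 0
  | fuel + 1, a, b =>
    if b = 0 then 0
    else
      let p := if b &&& 1 = 1 then a else 0
      let a' := a <<< 1
      let a'' := if a' &&& 0x100 ≠ 0 then a' ^^^ 0x11B else a'
      p ^^^ gfMulGo fuel a'' (b >>> 1)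

def gfMul (a b : Nat) : Nat := gfMulGo b a b

-- _inv_sub: inverse affine transform, then y^254 by square-and-multiply
def invSub (b : Nat) : Nat :=
  let y := ([1, 3, 6] : List Nat).foldl
    (fun y n => y ^^^ (((b <<< n) ||| (b >>> (8 - n))) &&& 0xFF)) 0x05
  let rt := (List.range 7).foldl
    (fun (rt : Nat × Nat) _ => (gfMul rt.1 rt.2, gfMul rt.2 rt.2)) (1, gfMul y y)
  rt.1

def inv_bytesub_alt (x : Int) : Int :=
  (PySem.List.pyRange 15 (-1) (-1)).foldl
    (fun (acc : Int) (i : Int) =>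
      acc <<< (8:Nat) + (invSub (PySem.Int.band (x >>> (8 * i).toNat) 255).toNat : Int))
    0

-- ===== PRECONDITION & SPEC =====
def Spec_inv_bytesub (x : Int) (out : Int) : Prop := out = inv_bytesub_alt x
instance (x : Int) (out : Int) : Decidable (Spec_inv_bytesub x out) := by unfold Spec_inv_bytesub; infer_instance

-- ===== CLAIM (what is proved, stated in full; the proofs are below) =====
def Claim_equal_inv_bytesub : Prop := ∀ (x : Int), Dom_inv_bytesub x → Spec_inv_bytesub x (inv_bytesub x)

-- ===== LEMMAS AND PROOFS =====

-- Python's x & (2^k - 1) is x mod 2^k (Int.emod), for every integer x (also negative).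
theorem band_mask (k : Nat) (x : Int) : PySem.Int.band x ((2:Int)^k - 1) = x % 2^k := by
  have hp : (0:Int) < 2^k := by positivity
  have hmask : (0:Int) ≤ 2^k - 1 := by omega
  have hcast : ((2^k : Nat) : Int) = (2:Int)^k := by push_cast; ring
  have htn : ((2:Int)^k - 1).toNat = 2^k - 1 := by omega
  unfold PySem.Int.band
  split
  · next hx =>
    rw [htn, Nat.and_two_pow_sub_one_eq_mod]
    push_cast
    rw [Int.toNat_of_nonneg hx]
  · next hx =>
    rw [htn, Nat.and_comm, Nat.and_two_pow_sub_one_eq_mod]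
    set y : Nat := (-x - 1).toNat with hy
    set q : Nat := y / 2^k with hq
    set r : Nat := y % 2^k with hr
    have hxy : x = -(y:Int) - 1 := by omega
    have hrlt : (r:Int) < 2^k := by
      rw [← hcast]; exact_mod_cast Nat.mod_lt _ (by positivity)
    have hrnn : (0:Int) ≤ r := by positivity
    have hc : ((2^k - 1 - r : Nat):Int) = (2:Int)^k - 1 - r := by
      rw [← hcast]; omega
    have hyq : (y:Int) = 2^k * (q:Int) + r := by
      rw [← hcast]; exact_mod_cast (Nat.div_add_mod y (2^k)).symm
    have hxe : x = ((2:Int)^k - 1 - r) + (2:Int)^k * (-(q:Int) - 1) := by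
      rw [hxy, hyq]; ring
    rw [hc, hxe, Int.add_mul_emod_self_left, Int.emod_eq_of_lt (by omega) (by omega)]

theorem band255 (x : Int) : PySem.Int.band x 255 = x % 256 := by
  have h := band_mask 8 x; norm_num at h; exact h

theorem band15 (x : Int) : PySem.Int.band x 15 = x % 16 := by
  have h := band_mask 4 x; norm_num at h; exact h

-- the common normal form: n low-order S-box-substituted bytes, little-endian
def fB : Nat → Int → Int
  | 0, _ => 0
  | n + 1, x => PySem.List.pyGetD invSbox (x % 256) 0 + 256 * fB n (x / 256)

-- A's loop body falls to fB
theorem loopA_eq_fB (l : List Int) : ∀ (acc x shift : Int),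
    (l.foldl
      (fun (s : Int × Int × Int) (_i : Int) =>
        let acc := s.1
        let x := s.2.1
        let shift := s.2.2
        let v := PySem.Int.band x 255
        let x := x >>> (8:Nat)
        (acc + PySem.List.pyGetD invSbox ((v >>> (4:Nat)) * 16 + PySem.Int.band v 15) 0 * shift,
         x, shift <<< (8:Nat)))
      (acc, x, shift)).1 = acc + shift * fB l.length x := by
  induction l with
  | nil => intro acc x shift; simp [fB]
  | cons hd tl ih =>
    intro acc x shift
    rw [List.foldl_cons]
    dsimp only
    rw [ih]
    have hidx : ((x % 256) >>> (4:Nat)) * 16 + PySem.Int.band (x % 256) 15 = x % 256 := by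
      rw [Int.shiftRight_eq_div_pow, band15]
      have h := Int.mul_ediv_add_emod (x % 256) 16
      norm_num
      omega
    rw [band255, hidx, Int.shiftRight_eq_div_pow, Int.shiftLeft_eq]
    norm_num
    show _ = acc + shift * (PySem.List.pyGetD invSbox (x % 256) 0 + 256 * fB tl.length (x / 256))
    ring

-- the algebraic inverse S-box agrees with the table on every byte value
set_option maxRecDepth 4000 in
theorem invSub_table : ∀ (n : Fin 256), (invSub n.val : Int) = PySem.List.pyGetD invSbox (n.val : Int) 0 := by
  decide

-- [n-1, …, 0] : the index list B walks
def revRange : Nat → List Int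
  | 0 => []
  | n + 1 => (n : Int) :: revRange n

-- fB grows at the top byte
theorem fB_succ (n : Nat) : ∀ x, fB (n + 1) x = fB n x + PySem.List.pyGetD invSbox (x / 256 ^ n % 256) 0 * 256 ^ n := by
  induction n with
  | zero => intro x; simp [fB]
  | succ n ih =>
    intro x
    have hdd : x / 256 / 256 ^ n = x / 256 ^ (n + 1) := by
      rw [Int.ediv_ediv_of_nonneg (by norm_num : (0:Int) ≤ 256), pow_succ']
    calc fB (n + 1 + 1) x
        = PySem.List.pyGetD invSbox (x % 256) 0 + 256 * fB (n + 1) (x / 256) := rfl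
      _ = PySem.List.pyGetD invSbox (x % 256) 0
            + 256 * (fB n (x / 256) + PySem.List.pyGetD invSbox (x / 256 / 256 ^ n % 256) 0 * 256 ^ n) := by rw [ih]
      _ = fB (n + 1) x + PySem.List.pyGetD invSbox (x / 256 ^ (n + 1) % 256) 0 * 256 ^ (n + 1) := by
            rw [hdd]; show _ = PySem.List.pyGetD invSbox (x % 256) 0 + 256 * fB n (x / 256) + _; ring

-- B's Horner pass falls to fB
theorem loopB_eq_fB (n : Nat) (x : Int) : ∀ (acc : Int),
    ((revRange n).foldl
      (fun (acc : Int) (i : Int) =>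
        acc <<< (8:Nat) + (invSub (PySem.Int.band (x >>> (8 * i).toNat) 255).toNat : Int))
      acc) = acc * 256 ^ n + fB n x := by
  induction n with
  | zero => intro acc; simp [revRange, fB]
  | succ n ih =>
    intro acc
    rw [revRange, List.foldl_cons, ih]
    have hm : (0:Int) ≤ x / 256 ^ n % 256 ∧ x / 256 ^ n % 256 < 256 :=
      ⟨Int.emod_nonneg _ (by norm_num), Int.emod_lt_of_pos _ (by norm_num)⟩
    have htn : ((8:Int) * (n:Int)).toNat = 8 * n := by
      have : ((8:Int) * (n:Int)) = ((8 * n : Nat) : Int) := by push_cast; ring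
      rw [this, Int.toNat_natCast]
    have hb : PySem.Int.band (x >>> ((8:Int) * (n:Int)).toNat) 255 = x / 256 ^ n % 256 := by
      rw [htn, band255, Int.shiftRight_eq_div_pow]
      norm_num [pow_mul]
    have hs : (invSub (PySem.Int.band (x >>> ((8:Int) * (n:Int)).toNat) 255).toNat : Int)
        = PySem.List.pyGetD invSbox (x / 256 ^ n % 256) 0 := by
      rw [hb]
      have hlt : (x / 256 ^ n % 256).toNat < 256 := by omega
      have := invSub_table ⟨(x / 256 ^ n % 256).toNat, hlt⟩
      simpa [Int.toNat_of_nonneg hm.1] using this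
    rw [hs, Int.shiftLeft_eq, fB_succ]
    norm_num
    ring

-- ===== VERDICT (by name: the statement is the Claim_ definition above) =====
theorem inv_bytesub_spec : Claim_equal_inv_bytesub := by
  intro x _
  unfold Spec_inv_bytesub inv_bytesub inv_bytesub_alt
  rw [loopA_eq_fB]
  have h : PySem.List.pyRange 15 (-1) (-1) = revRange 16 := by decide
  rw [h, loopB_eq_fB]
  have hlen : (PySem.List.pyRange 0 16 1).length = 16 := by decide
  rw [hlen]; ring
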